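-- pv_equiv track=rewrite | github.com/seohyun-j/Algorithm | Programmers/Level_3/77886.py | solution
-- ===== SOURCE A (Python) =====
-- def solution(s):
--     def extract(word):
--         cnt, stack = 0, []
--         for i in word:
--             if i == '0' and stack[-2:] == ['1', '1']:
--                 stack.pop()
--                 stack.pop()
--                 cnt += 1
--             else:
--                 stack.append(i)
--         return ''.join(stack), cnt
--
--     def rearrange(word):
--         for i in range(-1, -len(word) - 1, -1):
--             pointer = len(word) + (i + 1)
--             if word[i] == '0':
--                 return word[:pointer] + '110' + word[pointer:]
--         return '110' + word
--
--     answer = []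
--     for val in s:
--         # 110 제거 하기
--         val, count = extract(val)
--
--         # 110 정렬하여 넣기
--         for _ in range(count):
--             val = rearrange(val)
--
--         answer.append(val)
--     return answer
-- ===== SOURCE B (Python) =====
-- def solution(s):
--     answer = []
--     for word in s:
--         stack = []
--         cnt = 0
--         for c in word:
--             if c == '0' and len(stack) >= 2 and stack[-1] == '1' and stack[-2] == '1':
--                 stack.pop()
--                 stack.pop()
--                 cnt += 1
--             else:
--                 stack.append(c)
--         w = ''.join(stack)
--         p = w.rfind('0')
--         answer.append(w[:p + 1] + '110' * cnt + w[p + 1:])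
--     return answer
-- ===== Notes on version B (the rewrite author's own statement) =====
-- stated objective: alternative
-- what changed: A reinserts the removed '110' blocks one at a time, re-scanning the string from the right for each of count insertions; B does the same stack removal pass but then inserts '110'*count in one step after the last '0' located by a single rfind.
import Mathlib
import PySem

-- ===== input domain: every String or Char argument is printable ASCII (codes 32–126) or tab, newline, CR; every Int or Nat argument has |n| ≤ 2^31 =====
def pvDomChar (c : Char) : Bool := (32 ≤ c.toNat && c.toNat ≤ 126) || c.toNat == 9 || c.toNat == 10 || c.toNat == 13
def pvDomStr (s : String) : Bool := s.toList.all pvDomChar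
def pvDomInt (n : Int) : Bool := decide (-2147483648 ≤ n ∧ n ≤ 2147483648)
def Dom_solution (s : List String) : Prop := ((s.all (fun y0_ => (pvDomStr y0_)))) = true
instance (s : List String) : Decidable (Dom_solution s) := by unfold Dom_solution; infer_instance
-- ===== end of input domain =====

-- B removes '110' substrings with the same stack pass but replaces A's per-count
-- rearrange loop (a fresh right-to-left scan for every insertion) by a single
-- rfind of the last '0' and one slice insertion of '110'*count.

-- ===== PORT A =====

-- extract's loop body: stack[-2:] == ['1','1'] test, two pops / an append
def extractStepA (st : List Char × Int) (c : Char) : List Char × Int :=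
  if c = '0' ∧ PySem.List.slice st.1 (some (-2)) none = ['1', '1'] then
    (st.1.dropLast.dropLast, st.2 + 1)
  else (st.1 ++ [c], st.2)

def extractA (word : List Char) : List Char × Int :=
  word.foldl extractStepA ([], 0)

-- rearrange's 'for i in range(-1, -len(word) - 1, -1)' with its early return
def rearrangeGo (word : List Char) : List Int → List Char
  | [] => ['1', '1', '0'] ++ word
  | i :: rest =>
      let pointer : Int := (word.length : Int) + (i + 1)
      if PySem.List.pyGet? word i = some '0' then
        PySem.List.slice word none (some pointer) ++ ['1', '1', '0'] ++
          PySem.List.slice word (some pointer) none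
      else rearrangeGo word rest

def rearrangeA (word : List Char) : List Char :=
  rearrangeGo word (PySem.List.pyRange (-1) (-(word.length : Int) - 1) (-1))

def elemA (val : String) : String :=
  let e := extractA val.toList
  String.ofList (rearrangeA^[e.2.toNat] e.1)

def solution (s : List String) : List String :=
  s.foldl (fun answer val => answer ++ [elemA val]) []

-- ===== PORT B =====

def elemB (word : String) : String :=
  let e := word.toList.foldl (fun (st : List Char × Int) c =>
      if c = '0' ∧ 2 ≤ st.1.length ∧ PySem.List.pyGet? st.1 (-1) = some '1' ∧
          PySem.List.pyGet? st.1 (-2) = some '1' then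
        (st.1.dropLast.dropLast, st.2 + 1)
      else (st.1 ++ [c], st.2)) ([], 0)
  let p := PySem.Chars.rfind e.1 ['0']
  String.ofList (PySem.List.slice e.1 none (some (p + 1)) ++
    PySem.List.pyRepeat ['1', '1', '0'] e.2 ++
    PySem.List.slice e.1 (some (p + 1)) none)

def solution_alt (s : List String) : List String :=
  s.foldl (fun answer word => answer ++ [elemB word]) []

-- ===== PRECONDITION & SPEC =====
def Spec_solution (s : List String) (out : List String) : Prop := out = solution_alt s
instance (s : List String) (out : List String) : Decidable (Spec_solution s out) := by unfold Spec_solution; infer_instance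

-- ===== CLAIM (what is proved, stated in full; the proofs are below) =====
def Claim_equal_solution : Prop := ∀ (s : List String), Dom_solution s → Spec_solution s (solution s)

-- ===== LEMMAS AND PROOFS =====

theorem pyRange_neg (a b : Nat) :
    PySem.List.pyRange (-(a : Int) - 1) (-(b : Int) - 1) (-1)
      = (List.range (b - a)).map (fun (j : Nat) => -(a : Int) - 1 - (j : Int)) := by
  unfold PySem.List.pyRange
  rw [if_neg (by norm_num), if_neg (by norm_num : ¬ ((0:Int) < -1))]
  by_cases h : a < b
  · rw [if_pos (by omega)]
    have h1 : ((-(a:Int) - 1 - (-(b:Int) - 1) + - -1 - 1) / - -1) = ((b:Int) - a) := by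
      norm_num; ring
    rw [h1, show ((b:Int) - a).toNat = b - a by omega]
    exact List.map_congr_left fun j hj => by ring
  · rw [if_neg (by omega)]
    simp [show b - a = 0 by omega]

theorem rearrangeGo_spec (w : List Char) :
    ∀ m k, k + m = w.length →
      rearrangeGo w ((List.range m).map (fun (j : Nat) => -(k : Int) - 1 - (j : Int))) =
        match (w.reverse.drop k).findIdx? (· == '0') with
        | some q => w.take (w.length - (k + q)) ++ ['1', '1', '0'] ++ w.drop (w.length - (k + q))
        | none => ['1', '1', '0'] ++ w := by
  intro m
  induction m with
  | zero =>
      intro k hk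
      have hd : w.reverse.drop k = [] := by
        apply List.drop_eq_nil_of_le; simp; omega
      simp [hd, rearrangeGo]
  | succ m ih =>
      intro k hk
      have hkn : k < w.length := by omega
      rw [List.range_succ_eq_map, List.map_cons]
      have hrev : w.reverse.drop k = w[w.length - 1 - k] :: w.reverse.drop (k + 1) := by
        rw [List.drop_eq_getElem_cons (by simp; omega)]
        congr 1
        exact List.getElem_reverse (by simp; omega)
      have hget : PySem.List.pyGet? w (-(k : Int) - 1 - (0 : Nat)) = some w[w.length - 1 - k] := by
        have : (-(k : Int) - 1 - (0 : Nat)) = -((k + 1 : Nat) : Int) := by push_cast; ring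
        rw [this, PySem.List.pyGet?_neg_natCast w (k + 1) (by omega) (by omega)]
        rw [show w.length - (k + 1) = w.length - 1 - k from by omega]
        rw [List.getElem?_eq_getElem (by omega)]
      rw [rearrangeGo]
      by_cases hz : w[w.length - 1 - k] = '0'
      · rw [if_pos (by rw [hget, hz])]
        rw [hrev, List.findIdx?_cons]
        rw [if_pos (by simp [hz])]
        have hp : ((w.length : Int) + (-(k : Int) - 1 - (0 : Nat) + 1)) = ((w.length - k : Nat) : Int) := by
          push_cast; omega
        rw [hp, PySem.List.slice_to_natCast, PySem.List.slice_from_natCast]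
        simp
      · rw [if_neg (by rw [hget]; simp [hz])]
        have hfun : (List.map Nat.succ (List.range m)).map (fun (j : Nat) => -(k : Int) - 1 - (j : Int))
            = (List.range m).map (fun (j : Nat) => -((k+1 : Nat) : Int) - 1 - (j : Int)) := by
          rw [List.map_map]
          refine List.map_congr_left fun j hj => ?_
          simp only [Function.comp_apply, Nat.succ_eq_add_one]
          push_cast
          ring
        rw [hfun, ih (k + 1) (by omega)]
        rw [hrev, List.findIdx?_cons, if_neg (by simp [hz])]
        cases hfi : (w.reverse.drop (k + 1)).findIdx? (· == '0') with
        | none => simp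
        | some q =>
            simp only [Option.map_some]
            have : k + 1 + q = k + (q + 1) := by omega
            rw [this]

def repC (k : Nat) : List Char := (List.replicate k ['1', '1', '0']).flatten

def insAll (w : List Char) (k : Nat) : List Char :=
  match w.reverse.findIdx? (· == '0') with
  | some q => w.take (w.length - q) ++ repC k ++ w.drop (w.length - q)
  | none => repC k ++ w

theorem insAll_some (w : List Char) (k q : Nat)
    (h : w.reverse.findIdx? (· == '0') = some q) :
    insAll w k = w.take (w.length - q) ++ repC k ++ w.drop (w.length - q) := by
  unfold insAll; rw [h]

theorem insAll_none (w : List Char) (k : Nat)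
    (h : w.reverse.findIdx? (· == '0') = none) :
    insAll w k = repC k ++ w := by
  unfold insAll; rw [h]

theorem repC_succ' (k : Nat) : repC (k + 1) = repC k ++ ['1', '1', '0'] := by
  simp [repC, List.replicate_succ']

theorem repC_one : repC 1 = ['1', '1', '0'] := by simp [repC]

theorem repC_length (k : Nat) : (repC k).length = 3 * k := by simp [repC]; ring

theorem insAll_zero (w : List Char) : insAll w 0 = w := by
  unfold insAll
  cases h : w.reverse.findIdx? (· == '0') with
  | none => simp [repC]
  | some q => simp [repC, List.take_append_drop]

theorem findIdx_repR_zero (k : Nat) (l : List Char) :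
    ((repC k).reverse ++ '0' :: l).findIdx? (· == '0') = some 0 := by
  cases k with
  | zero => simp [repC, List.findIdx?_cons]
  | succ k =>
      rw [repC_succ']
      simp [List.findIdx?_cons]

theorem findIdx_repR_zero' (k : Nat) :
    ((repC (k + 1)).reverse).findIdx? (· == '0') = some 0 := by
  rw [repC_succ']
  simp [List.findIdx?_cons]

theorem rearrangeA_eq (w : List Char) : rearrangeA w = insAll w 1 := by
  unfold rearrangeA
  have h := pyRange_neg 0 w.length
  have h2 := rearrangeGo_spec w w.length 0 (by omega)
  simp only [Nat.cast_zero, neg_zero, zero_sub, Nat.sub_zero, List.drop_zero,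
    Nat.zero_add] at h h2
  rw [h, h2]
  cases hfi : w.reverse.findIdx? (· == '0') with
  | none => rw [insAll_none w 1 hfi, repC_one]
  | some q =>
      rw [insAll_some w 1 q hfi, repC_one]

theorem rearrange_insAll (w : List Char) (k : Nat) :
    rearrangeA (insAll w k) = insAll w (k + 1) := by
  rcases k with _ | k
  · rw [insAll_zero, rearrangeA_eq]
  · rw [rearrangeA_eq]
    cases h : w.reverse.findIdx? (· == '0') with
    | some q =>
        obtain ⟨hq, hz0, hlt⟩ := List.findIdx?_eq_some_iff_getElem.mp h
        have hqn : q < w.length := by simpa using hq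
        have hz : w.reverse[q]'hq = '0' := by simpa using hz0
        have h1 : (w.drop (w.length - q)).reverse = w.reverse.take q := by
          rw [List.reverse_drop]; congr 1; omega
        have h2 : (w.take (w.length - q)).reverse = '0' :: w.reverse.drop (q + 1) := by
          rw [List.reverse_take, show w.length - (w.length - q) = q from by omega]
          rw [List.drop_eq_getElem_cons (by simpa using hqn), hz]
        have hnone : (w.reverse.take q).findIdx? (· == '0') = none := by
          rw [List.findIdx?_eq_none_iff]
          intro x hx
          obtain ⟨i, hi, hxe⟩ := List.getElem_of_mem hx
          have hiq : i < q := by simp at hi; omega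
          rw [← hxe, List.getElem_take]
          simpa using hlt i hiq
        have hfX : (insAll w (k + 1)).reverse.findIdx? (· == '0') = some q := by
          rw [insAll_some w (k + 1) q h]
          simp only [List.reverse_append, List.append_assoc, h1, h2]
          rw [List.findIdx?_append, hnone, findIdx_repR_zero]
          simp [List.length_take]
          omega
        rw [insAll_some _ 1 q hfX, insAll_some w (k + 1) q h, insAll_some w (k + 2) q h]
        have hlenX : (w.take (w.length - q) ++ repC (k + 1) ++ w.drop (w.length - q)).length - q
            = (w.take (w.length - q) ++ repC (k + 1)).length := by
          simp [repC_length]; omega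
        rw [hlenX, List.take_left' rfl, List.drop_left' rfl]
        rw [repC_one, repC_succ' (k + 1)]
        simp [List.append_assoc]
    | none =>
        have hfX : (insAll w (k + 1)).reverse.findIdx? (· == '0') = some w.length := by
          rw [insAll_none w (k + 1) h, List.reverse_append, List.findIdx?_append, h,
              findIdx_repR_zero' k]
          simp
        rw [insAll_some _ 1 w.length hfX, insAll_none w (k + 1) h, insAll_none w (k + 2) h]
        have hL : (repC (k + 1) ++ w).length - w.length = (repC (k + 1)).length := by simp
        rw [hL, List.take_left' rfl, List.drop_left' rfl]
        rw [repC_one, repC_succ' (k + 1)]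

theorem prefix0_iff (l : List Char) : (['0'] : List Char).isPrefixOf l = true ↔ ∃ t, l = '0' :: t := by
  cases l with
  | nil => simp [List.isPrefixOf]
  | cons a t => simp [List.isPrefixOf]; aesop

theorem rfind_go_finds (w : List Char) (i0 : Nat) (h0 : i0 < w.length)
    (hz : w[i0] = '0') (hnz : ∀ i, i0 < i → (hi : i < w.length) → w[i] ≠ '0') :
    ∀ j, i0 ≤ j → PySem.Chars.rfind.go w ['0'] j = (i0 : Int) := by
  intro j
  induction j with
  | zero =>
      intro hij
      have h00 : i0 = 0 := by omega
      subst h00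
      have hw : w = '0' :: w.drop 1 := by
        conv_lhs => rw [← List.drop_zero (l := w), List.drop_eq_getElem_cons h0]
        simp [hz]
      simp only [PySem.Chars.rfind.go]
      rw [if_pos ((prefix0_iff w).mpr ⟨w.drop 1, hw⟩)]
      simp
  | succ j ih =>
      intro hij
      simp only [PySem.Chars.rfind.go]
      by_cases he : i0 = j + 1
      · subst he
        rw [if_pos ((prefix0_iff _).mpr ⟨w.drop (j + 1 + 1), by
          rw [List.drop_eq_getElem_cons h0, hz]⟩)]
      · have hle : i0 ≤ j := by omega
        rw [if_neg, ih hle]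
        intro hpre
        obtain ⟨t, ht⟩ := (prefix0_iff _).mp hpre
        by_cases hlen : j + 1 < w.length
        · have : w.drop (j + 1) = w[j + 1] :: w.drop (j + 2) := List.drop_eq_getElem_cons hlen
          rw [this] at ht
          exact hnz (j + 1) (by omega) hlen (List.cons_eq_cons.mp ht).1
        · rw [List.drop_eq_nil_of_le (by omega)] at ht
          simp at ht

theorem rfind_go_none (w : List Char) (hnz : ∀ i, (hi : i < w.length) → w[i] ≠ '0') :
    ∀ j, PySem.Chars.rfind.go w ['0'] j = -1 := by
  intro j
  induction j with
  | zero =>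
      simp only [PySem.Chars.rfind.go]
      rw [if_neg]
      intro hpre
      obtain ⟨t, ht⟩ := (prefix0_iff _).mp hpre
      subst ht
      exact hnz 0 (by simp) rfl
  | succ j ih =>
      simp only [PySem.Chars.rfind.go]
      rw [if_neg, ih]
      intro hpre
      obtain ⟨t, ht⟩ := (prefix0_iff _).mp hpre
      by_cases hlen : j + 1 < w.length
      · have hd : w.drop (j + 1) = w[j + 1] :: w.drop (j + 2) := List.drop_eq_getElem_cons hlen
        rw [hd] at ht
        exact hnz (j + 1) hlen (List.cons_eq_cons.mp ht).1
      · rw [List.drop_eq_nil_of_le (by omega)] at ht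
        simp at ht

theorem rfind_some (w : List Char) (q : Nat)
    (h : w.reverse.findIdx? (· == '0') = some q) :
    PySem.Chars.rfind w ['0'] = ((w.length - 1 - q : Nat) : Int) := by
  obtain ⟨hq, hz0, hlt⟩ := List.findIdx?_eq_some_iff_getElem.mp h
  have hqn : q < w.length := by simpa using hq
  have hz : w[w.length - 1 - q] = '0' := by
    have := List.getElem_reverse (l := w) (i := q) hq
    rw [← this]
    simpa using hz0
  have hnz : ∀ i, w.length - 1 - q < i → (hi : i < w.length) → w[i] ≠ '0' := by
    intro i hgt hi
    have hj : w.length - 1 - i < q := by omega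
    have := hlt (w.length - 1 - i) hj
    rw [List.getElem_reverse (by simp; omega)] at this
    simp only [show w.length - 1 - (w.length - 1 - i) = i from by omega] at this
    simpa using this
  show PySem.Chars.rfind.go w ['0'] w.length = _
  exact rfind_go_finds w (w.length - 1 - q) (by omega) hz hnz w.length (by omega)

theorem rfind_none (w : List Char)
    (h : w.reverse.findIdx? (· == '0') = none) :
    PySem.Chars.rfind w ['0'] = -1 := by
  have hnz : ∀ i, (hi : i < w.length) → w[i] ≠ '0' := by
    intro i hi
    have hm : w[i] ∈ w.reverse := by rw [List.mem_reverse]; exact List.getElem_mem hi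
    have := List.findIdx?_eq_none_iff.mp h _ hm
    simpa using this
  exact rfind_go_none w hnz w.length

theorem cond_iff (st : List Char) :
    PySem.List.slice st (some (-2)) none = ['1', '1'] ↔
      2 ≤ st.length ∧ PySem.List.pyGet? st (-1) = some '1' ∧
        PySem.List.pyGet? st (-2) = some '1' := by
  by_cases hlen : 2 ≤ st.length
  · rw [PySem.List.slice_from_neg_ofNat st 2 (by norm_num)]
    rw [List.drop_eq_getElem_cons (i := st.length - 2) (by omega)]
    rw [show st.length - 2 + 1 = st.length - 1 from by omega]
    rw [List.drop_eq_getElem_cons (i := st.length - 1) (by omega)]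
    rw [show st.length - 1 + 1 = st.length from by omega, List.drop_length]
    rw [PySem.List.pyGet?_neg_one, List.getLast?_eq_getElem?,
        List.getElem?_eq_getElem (by omega)]
    rw [PySem.List.pyGet?_neg_ofNat st 2 (by norm_num) hlen,
        List.getElem?_eq_getElem (by omega)]
    simp [hlen]
    constructor
    · rintro ⟨ha, hb⟩; exact ⟨hb, ha⟩
    · rintro ⟨ha, hb⟩; exact ⟨hb, ha⟩
  · constructor
    · intro hsl
      exfalso
      have := congrArg List.length hsl
      rw [PySem.List.slice_from_neg_ofNat st 2 (by norm_num)] at this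
      simp at this
      omega
    · rintro ⟨ha, -⟩; omega

theorem b_insert_eq (w : List Char) (cnt : Int) :
    PySem.List.slice w none (some (PySem.Chars.rfind w ['0'] + 1)) ++
      PySem.List.pyRepeat ['1', '1', '0'] cnt ++
      PySem.List.slice w (some (PySem.Chars.rfind w ['0'] + 1)) none
    = insAll w cnt.toNat := by
  have hrep : PySem.List.pyRepeat (['1', '1', '0'] : List Char) cnt = repC cnt.toNat := rfl
  cases h : w.reverse.findIdx? (· == '0') with
  | some q =>
      obtain ⟨hq, -, -⟩ := List.findIdx?_eq_some_iff_getElem.mp h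
      have hqn : q < w.length := by simpa using hq
      rw [insAll_some w cnt.toNat q h, rfind_some w q h, hrep]
      rw [show ((w.length - 1 - q : Nat) : Int) + 1 = ((w.length - q : Nat) : Int) from by omega]
      rw [PySem.List.slice_to_natCast w (w.length - q),
          PySem.List.slice_from_natCast w (w.length - q)]
  | none =>
      rw [insAll_none w cnt.toNat h, rfind_none w h, hrep]
      rw [show (-1 : Int) + 1 = ((0 : Nat) : Int) from by norm_num]
      rw [PySem.List.slice_to_natCast w 0, PySem.List.slice_from_natCast w 0]
      simp

theorem iterate_rearrange (w : List Char) (k : Nat) :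
    rearrangeA^[k] w = insAll w k := by
  induction k with
  | zero => simp [insAll_zero]
  | succ k ih => rw [Function.iterate_succ_apply', ih, rearrange_insAll]

theorem extract_eq (w : List Char) :
    extractA w = w.foldl (fun (st : List Char × Int) c =>
      if c = '0' ∧ 2 ≤ st.1.length ∧ PySem.List.pyGet? st.1 (-1) = some '1' ∧
          PySem.List.pyGet? st.1 (-2) = some '1' then
        (st.1.dropLast.dropLast, st.2 + 1)
      else (st.1 ++ [c], st.2)) ([], 0) := by
  unfold extractA
  refine PySem.List.foldl_congr_mem _ _ _ _ ?_
  intro acc c _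
  unfold extractStepA
  by_cases h : c = '0' ∧ 2 ≤ acc.1.length ∧ PySem.List.pyGet? acc.1 (-1) = some '1' ∧
      PySem.List.pyGet? acc.1 (-2) = some '1'
  · rw [if_pos h, if_pos ⟨h.1, (cond_iff acc.1).mpr h.2⟩]
  · rw [if_neg h, if_neg ?_]
    intro hc
    exact h ⟨hc.1, (cond_iff acc.1).mp hc.2⟩

-- ===== VERDICT (by name: the statement is the Claim_ definition above) =====
theorem solution_spec : Claim_equal_solution := by
  intro s _
  unfold Spec_solution solution solution_alt
  rw [PySem.List.foldl_append_singleton_eq_map (f := elemA),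
      PySem.List.foldl_append_singleton_eq_map (f := elemB)]
  refine congrArg _ (List.map_congr_left fun v _ => ?_)
  simp only [elemA, elemB, ← extract_eq]
  rw [iterate_rearrange, ← b_insert_eq]
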